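-- pv_equiv track=rewrite | github.com/Eladir-Dev/asig_data_com. | maxCost.py | dp_longest_path
-- ===== SOURCE A (Python) =====
-- def dp_longest_path(matrix):
--     rows, cols = len(matrix), len(matrix[0])
--
--     dp = [[float("-inf")] * cols for _ in range(rows)]
--     parent = [[None] * cols for _ in range(rows)]
--
--     dp[0][0] = matrix[0][0]
--
--     for r in range(rows):
--         for c in range(cols):
--
--             # From up
--             if r > 0 and dp[r][c] < dp[r-1][c] + matrix[r][c]:
--                 dp[r][c] = dp[r-1][c] + matrix[r][c]
--                 parent[r][c] = (r-1, c)
--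
--             # From left
--             if c > 0 and dp[r][c] < dp[r][c-1] + matrix[r][c]:
--                 dp[r][c] = dp[r][c-1] + matrix[r][c]
--                 parent[r][c] = (r, c-1)
--
--     # ---- SAFE PATH RECONSTRUCTION ----
--     path_matrix = [[0] * cols for _ in range(rows)]
--     r, c = rows - 1, cols - 1
--
--     while True:
--         path_matrix[r][c] = 1
--
--         if parent[r][c] is None:
--             break  # reached the start safely
--
--         r, c = parent[r][c]
--
--     return dp[-1][-1], path_matrix
-- ===== SOURCE B (Python) =====
-- def dp_longest_path(matrix):
--     rows, cols = len(matrix), len(matrix[0])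
--
--     # dp built row by row, functionally: no -inf sentinel, no parent array.
--     dp = []
--     prev = []
--     for r in range(rows):
--         mrow = matrix[r]
--         row = []
--         for c in range(cols):
--             v = mrow[c]
--             if r == 0 and c == 0:
--                 row.append(v)
--             elif r == 0:
--                 row.append(row[c - 1] + v)
--             elif c == 0:
--                 row.append(prev[0] + v)
--             else:
--                 row.append(max(prev[c], row[c - 1]) + v)
--         dp.append(row)
--         prev = row
--
--     # Reconstruct the path cells by walking backward over dp values
--     # (up checked before left, matching A's strict-< tie-breaking),
--     # then render the 0/1 matrix by membership.
--     cells = []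
--     r, c = rows - 1, cols - 1
--     while True:
--         cells.append((r, c))
--         if r > 0 and dp[r][c] == dp[r - 1][c] + matrix[r][c]:
--             r -= 1
--         elif c > 0 and dp[r][c] == dp[r][c - 1] + matrix[r][c]:
--             c -= 1
--         else:
--             break
--     on = set(cells)
--     path_matrix = [[1 if (i, j) in on else 0 for j in range(cols)]
--                    for i in range(rows)]
--     return dp[-1][-1], path_matrix
-- ===== Notes on version B (the rewrite author's own statement) =====
-- stated objective: alternative
-- what changed: B replaces A's -inf-seeded in-place dp table and parent-pointer array by a functionally built row-by-row dp (each row computed from the previous one with an explicit max recurrence, no sentinel), and reconstructs the path by walking backward over dp values (up checked before left, matching A's strict-< tie-breaking), collecting the visited cells and rendering the 0/1 matrix by set membership.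
import Mathlib
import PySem

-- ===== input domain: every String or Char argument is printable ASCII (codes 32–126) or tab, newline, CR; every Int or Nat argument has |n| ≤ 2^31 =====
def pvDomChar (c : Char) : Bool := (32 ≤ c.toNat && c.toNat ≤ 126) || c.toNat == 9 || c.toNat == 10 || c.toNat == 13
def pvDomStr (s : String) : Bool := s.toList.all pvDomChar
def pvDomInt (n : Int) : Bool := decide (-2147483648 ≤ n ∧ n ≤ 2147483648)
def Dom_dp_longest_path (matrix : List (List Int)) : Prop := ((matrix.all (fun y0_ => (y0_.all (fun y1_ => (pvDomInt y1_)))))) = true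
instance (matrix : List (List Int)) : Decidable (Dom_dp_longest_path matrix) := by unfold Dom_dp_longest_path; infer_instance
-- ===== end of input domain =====

-- B is an alternative of the same cost: no -inf sentinel and no parent array — the dp
-- table is built row by row from a max recurrence, the path is recovered by a backward
-- walk over dp values (up before left, matching A's strict-< tie-breaking) and rendered
-- by set membership; return-value equivalence only (neither mutates its argument).

-- ===== PORT A =====
-- Python's float("-inf") dp sentinel is ported as `none : Option Int`
-- (none = -inf: none+k = none, none < some _, ¬(x < none), ¬(none < none) — exact for int matrices).
def oAdd (o : Option Int) (k : Int) : Option Int := o.map (· + k)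

def oLt : Option Int → Option Int → Bool
  | none, none => false
  | none, some _ => true
  | some _, none => false
  | some a, some b => decide (a < b)

def get2 {α : Type} (xss : List (List α)) (r c : Nat) (d : α) : α :=
  (xss.getD r []).getD c d

def set2 {α : Type} (xss : List (List α)) (r c : Nat) (v : α) : List (List α) :=
  xss.set r ((xss.getD r []).set c v)

-- one body of A's double loop (state: the dp table and the parent table)
def stepA (m : List (List Int)) (r : Nat)
    (st : List (List (Option Int)) × List (List (Option (Nat × Nat)))) (c : Nat) :
    List (List (Option Int)) × List (List (Option (Nat × Nat))) :=
  let mrc := get2 m r c 0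
  let st1 :=
    if decide (0 < r) && oLt (get2 st.1 r c none) (oAdd (get2 st.1 (r-1) c none) mrc) then
      (set2 st.1 r c (oAdd (get2 st.1 (r-1) c none) mrc), set2 st.2 r c (some (r-1, c)))
    else st
  if decide (0 < c) && oLt (get2 st1.1 r c none) (oAdd (get2 st1.1 r (c-1) none) mrc) then
    (set2 st1.1 r c (oAdd (get2 st1.1 r (c-1) none) mrc), set2 st1.2 r c (some (r, c-1)))
  else st1

-- A's `while True` parent-following loop; fuel bounds the steps (each parent step
-- strictly decreases r+c for the table A builds, so fuel rows+cols is never exhausted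
-- on inputs satisfying Pre_).
def walkA (par : List (List (Option (Nat × Nat)))) :
    Nat → Nat → Nat → List (List Int) → List (List Int)
  | fuel, r, c, path =>
    let path1 := set2 path r c 1
    match get2 par r c none with
    | none => path1
    | some (r', c') =>
      match fuel with
      | 0 => path1
      | fuel' + 1 => walkA par fuel' r' c' path1

def dp_longest_path (matrix : List (List Int)) : Int × List (List Int) :=
  let rows := matrix.length
  let cols := (matrix.headD []).length
  let dp0 := set2 (List.replicate rows (List.replicate cols (none : Option Int))) 0 0
      (some (get2 matrix 0 0 0))
  let par0 := List.replicate rows (List.replicate cols (none : Option (Nat × Nat)))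
  let st := (List.range rows).foldl
      (fun st r => (List.range cols).foldl (stepA matrix r) st) (dp0, par0)
  let path := walkA st.2 (rows + cols) (rows - 1) (cols - 1)
      (List.replicate rows (List.replicate cols (0 : Int)))
  ((get2 st.1 (rows - 1) (cols - 1) none).getD 0, path)

-- ===== PORT B =====
-- one dp row from the matrix row, the row index and the previous dp row
-- (indices are in range under Pre_, so list indexing is ported with getD)
def rowB (mrow : List Int) (r : Nat) (prev : List Int) (cols : Nat) : List Int :=
  (List.range cols).foldl (fun row c =>
    let v := mrow.getD c 0
    row ++ [if r = 0 ∧ c = 0 then v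
            else if r = 0 then row.getD (c-1) 0 + v
            else if c = 0 then prev.getD 0 0 + v
            else max (prev.getD c 0) (row.getD (c-1) 0) + v]) []

-- B's outer loop: fold the rows, carrying (dp so far, previous row)
def dpB (matrix : List (List Int)) (rows cols : Nat) : List (List Int) :=
  ((List.range rows).foldl (fun st r =>
    let row := rowB (matrix.getD r []) r st.2 cols
    (st.1 ++ [row], row)) (([] : List (List Int)), ([] : List Int))).1

-- B's backward `while True` walk collecting the path cells (fuel bounds the steps;
-- each step decreases r+c, so fuel rows+cols is never exhausted under Pre_)
def cellsB (dp matrix : List (List Int)) :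
    Nat → Nat → Nat → List (Nat × Nat) → List (Nat × Nat)
  | fuel, r, c, acc =>
    let acc1 := acc ++ [(r, c)]
    if decide (0 < r) &&
        ((dp.getD r []).getD c 0 == (dp.getD (r-1) []).getD c 0 + (matrix.getD r []).getD c 0) then
      match fuel with
      | 0 => acc1
      | f + 1 => cellsB dp matrix f (r-1) c acc1
    else if decide (0 < c) &&
        ((dp.getD r []).getD c 0 == (dp.getD r []).getD (c-1) 0 + (matrix.getD r []).getD c 0) then
      match fuel with
      | 0 => acc1
      | f + 1 => cellsB dp matrix f r (c-1) acc1
    else acc1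

def dp_longest_path_alt (matrix : List (List Int)) : Int × List (List Int) :=
  let rows := matrix.length
  let cols := (matrix.headD []).length
  let dp := dpB matrix rows cols
  let cells := cellsB dp matrix (rows + cols) (rows - 1) (cols - 1) []
  let on := PySem.Set.ofList cells
  let path := (List.range rows).map (fun i =>
    (List.range cols).map (fun j => if PySem.Set.contains on (i, j) then (1 : Int) else 0))
  ((dp.getD (rows - 1) []).getD (cols - 1) 0, path)

-- ===== PRECONDITION & SPEC =====
-- Pre_: exactly the inputs where Python A returns: matrix and its first row nonempty
-- (else matrix[0][0] raises IndexError) and every row at least as long as the first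
-- (else matrix[r][c] raises IndexError for some c < cols).
def Pre_dp_longest_path (matrix : List (List Int)) : Prop :=
  matrix ≠ [] ∧ matrix.headD [] ≠ [] ∧
    ∀ row ∈ matrix, (matrix.headD []).length ≤ row.length

instance (matrix : List (List Int)) : Decidable (Pre_dp_longest_path matrix) := by
  unfold Pre_dp_longest_path; infer_instance

def pvWitness_dp_longest_path : List (List Int) := [[1, 2], [3, 4]]

def Spec_dp_longest_path (matrix : List (List Int)) (out : Int × List (List Int)) : Prop := out = dp_longest_path_alt matrix
instance (matrix : List (List Int)) (out : Int × List (List Int)) : Decidable (Spec_dp_longest_path matrix out) := by unfold Spec_dp_longest_path; infer_instance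

-- ===== CLAIM (what is proved, stated in full; the proofs are below) =====
def Claim_equal_dp_longest_path : Prop := ∀ (matrix : List (List Int)), Dom_dp_longest_path matrix → Pre_dp_longest_path matrix → Spec_dp_longest_path matrix (dp_longest_path matrix)

-- ===== LEMMAS AND PROOFS =====

-- ---- get2 / set2 ----

theorem length_set2 {α : Type} (xss : List (List α)) (r c : Nat) (v : α) :
    (set2 xss r c v).length = xss.length := by
  simp [set2]

theorem row_get_set2 {α : Type} (xss : List (List α)) (r c : Nat) (v : α) (i : Nat) :
    (set2 xss r c v).getD i [] =
      if i = r ∧ r < xss.length then (xss.getD r []).set c v else xss.getD i [] := by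
  simp only [set2, List.getD_eq_getElem?_getD]
  by_cases h : i = r
  · subst h
    by_cases hr : i < xss.length
    · simp [List.getElem?_set_self, hr, List.getElem?_eq_getElem hr]
    · simp [hr, List.set_eq_of_length_le (Nat.le_of_not_lt hr)]
  · simp [List.getElem?_set_ne (by omega : r ≠ i), h]

theorem row_length_set2 {α : Type} (xss : List (List α)) (r c : Nat) (v : α) (i : Nat) :
    ((set2 xss r c v).getD i []).length = (xss.getD i []).length := by
  rw [row_get_set2]
  split
  · rename_i h; rw [List.length_set, h.1]
  · rfl

theorem get2_set2_self {α : Type} (xss : List (List α)) (r c : Nat) (v d : α)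
    (hr : r < xss.length) (hc : c < (xss.getD r []).length) :
    get2 (set2 xss r c v) r c d = v := by
  unfold get2
  rw [row_get_set2, if_pos ⟨rfl, hr⟩, List.getD_eq_getElem?_getD,
    List.getElem?_set_self hc]
  rfl

theorem get2_set2_ne {α : Type} (xss : List (List α)) (r c : Nat) (v d : α) (i j : Nat)
    (h : i ≠ r ∨ j ≠ c) :
    get2 (set2 xss r c v) i j d = get2 xss i j d := by
  simp only [get2, row_get_set2]
  split
  · rename_i hir
    rcases h with h | h
    · exact absurd hir.1 h
    · rw [hir.1, List.getD_eq_getElem?_getD, List.getD_eq_getElem?_getD,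
        List.getElem?_set_ne (by omega : c ≠ j), ← List.getD_eq_getElem?_getD]
  · rfl

theorem get2_replicate {α : Type} (n k : Nat) (x d : α) (i j : Nat) :
    get2 (List.replicate n (List.replicate k x)) i j d =
      if i < n ∧ j < k then x else d := by
  simp only [get2, List.getD_eq_getElem?_getD, List.getElem?_replicate]
  by_cases hi : i < n
  · simp [hi]
    by_cases hj : j < k
    · simp [hj, List.getElem?_replicate]
    · simp [hj, List.getElem?_replicate]
  · simp [hi]

-- ---- the mathematical dp table and parent table of A's loop ----

def Dcell (m : List (List Int)) (r c : Nat) (up lf : Option Int) : Option Int :=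
  let mrc := get2 m r c 0
  let init : Option Int := if r = 0 ∧ c = 0 then some (get2 m 0 0 0) else none
  let v1 := if decide (0 < r) && oLt init (oAdd up mrc) then oAdd up mrc else init
  if decide (0 < c) && oLt v1 (oAdd lf mrc) then oAdd lf mrc else v1

def Dspec (m : List (List Int)) : Nat → Nat → Option Int
  | 0, 0 => Dcell m 0 0 none none
  | 0, c+1 => Dcell m 0 (c+1) none (Dspec m 0 c)
  | r+1, 0 => Dcell m (r+1) 0 (Dspec m r 0) none
  | r+1, c+1 => Dcell m (r+1) (c+1) (Dspec m r (c+1)) (Dspec m (r+1) c)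

def Pspec (m : List (List Int)) (r c : Nat) : Option (Nat × Nat) :=
  let mrc := get2 m r c 0
  let init : Option Int := if r = 0 ∧ c = 0 then some (get2 m 0 0 0) else none
  let b1 := decide (0 < r) && oLt init (oAdd (Dspec m (r-1) c) mrc)
  let v1 := if b1 then oAdd (Dspec m (r-1) c) mrc else init
  if decide (0 < c) && oLt v1 (oAdd (Dspec m r (c-1)) mrc) then some (r, c-1)
  else if b1 then some (r-1, c) else none

theorem Dspec_eq (m : List (List Int)) (r c : Nat) :
    Dspec m r c = Dcell m r c (Dspec m (r-1) c) (Dspec m r (c-1)) := by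
  match r, c with
  | 0, 0 => simp [Dspec, Dcell]
  | 0, c+1 => simp [Dspec, Dcell]
  | r+1, 0 => simp [Dspec, Dcell]
  | r+1, c+1 =>
    simp only [Nat.add_sub_cancel]
    conv_lhs => rw [Dspec]

theorem Dspec_some (m : List (List Int)) : ∀ r c, (Dspec m r c).isSome := by
  intro r
  induction r with
  | zero =>
    intro c
    induction c with
    | zero => simp [Dspec, Dcell, oLt]
    | succ j ih =>
      obtain ⟨x, hx⟩ := Option.isSome_iff_exists.mp ih
      simp [Dspec, Dcell, hx, oAdd, oLt]
  | succ i ihr =>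
    intro c
    induction c with
    | zero =>
      obtain ⟨x, hx⟩ := Option.isSome_iff_exists.mp (ihr 0)
      simp [Dspec, Dcell, hx, oAdd, oLt]
    | succ j ih =>
      obtain ⟨x, hx⟩ := Option.isSome_iff_exists.mp (ihr (j+1))
      have hDm : Dspec m (i+1) (j+1) =
          if oLt (oAdd (Dspec m i (j+1)) (get2 m (i+1) (j+1) 0))
                 (oAdd (Dspec m (i+1) j) (get2 m (i+1) (j+1) 0))
          then oAdd (Dspec m (i+1) j) (get2 m (i+1) (j+1) 0)
          else oAdd (Dspec m i (j+1)) (get2 m (i+1) (j+1) 0) := by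
        simp [Dspec, Dcell, hx, oAdd, oLt]
      rw [hDm]
      split
      · rename_i hlt
        cases hl2 : Dspec m (i+1) j with
        | none => rw [hl2] at hlt; rw [hx] at hlt; simp [oAdd, oLt] at hlt
        | some y => simp [hl2, oAdd]
      · simp [hx, oAdd]

-- walk-facing characterisations
theorem P00 (m : List (List Int)) : Pspec m 0 0 = none := by
  simp [Pspec]

theorem Ptop (m : List (List Int)) (j : Nat) : Pspec m 0 (j+1) = some (0, j) := by
  obtain ⟨x, hx⟩ := Option.isSome_iff_exists.mp (Dspec_some m 0 j)
  simp [Pspec, hx, oAdd, oLt]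

theorem Dtop (m : List (List Int)) (j : Nat) :
    Dspec m 0 (j+1) = oAdd (Dspec m 0 j) (get2 m 0 (j+1) 0) := by
  obtain ⟨x, hx⟩ := Option.isSome_iff_exists.mp (Dspec_some m 0 j)
  simp [Dspec, Dcell, hx, oAdd, oLt]

theorem Pleft (m : List (List Int)) (i : Nat) : Pspec m (i+1) 0 = some (i, 0) := by
  obtain ⟨x, hx⟩ := Option.isSome_iff_exists.mp (Dspec_some m i 0)
  simp [Pspec, hx, oAdd, oLt]

theorem Dleft (m : List (List Int)) (i : Nat) :
    Dspec m (i+1) 0 = oAdd (Dspec m i 0) (get2 m (i+1) 0 0) := by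
  obtain ⟨x, hx⟩ := Option.isSome_iff_exists.mp (Dspec_some m i 0)
  simp [Dspec, Dcell, hx, oAdd, oLt]

theorem Pmid (m : List (List Int)) (i j : Nat) :
    Pspec m (i+1) (j+1) =
      if oLt (oAdd (Dspec m i (j+1)) (get2 m (i+1) (j+1) 0))
             (oAdd (Dspec m (i+1) j) (get2 m (i+1) (j+1) 0))
      then some (i+1, j) else some (i, j+1) := by
  obtain ⟨x, hx⟩ := Option.isSome_iff_exists.mp (Dspec_some m i (j+1))
  simp [Pspec, hx, oAdd, oLt]

theorem Dmid (m : List (List Int)) (i j : Nat) :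
    Dspec m (i+1) (j+1) =
      if oLt (oAdd (Dspec m i (j+1)) (get2 m (i+1) (j+1) 0))
             (oAdd (Dspec m (i+1) j) (get2 m (i+1) (j+1) 0))
      then oAdd (Dspec m (i+1) j) (get2 m (i+1) (j+1) 0)
      else oAdd (Dspec m i (j+1)) (get2 m (i+1) (j+1) 0) := by
  obtain ⟨x, hx⟩ := Option.isSome_iff_exists.mp (Dspec_some m i (j+1))
  simp [Dspec, Dcell, hx, oAdd, oLt]

-- ---- the loop invariant for A ----

def InvA (m : List (List Int)) (rows cols k : Nat)
    (st : List (List (Option Int)) × List (List (Option (Nat × Nat)))) : Prop :=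
  st.1.length = rows ∧ st.2.length = rows ∧
  (∀ i, i < rows → (st.1.getD i []).length = cols ∧ (st.2.getD i []).length = cols) ∧
  (∀ i j, i < rows → j < cols →
    if i * cols + j < k
    then get2 st.1 i j none = Dspec m i j ∧ get2 st.2 i j none = Pspec m i j
    else get2 st.1 i j none = (if i = 0 ∧ j = 0 then some (get2 m 0 0 0) else none) ∧
         get2 st.2 i j none = none)

theorem idx_inj {cols i j r c : Nat} (hj : j < cols) (hc : c < cols)
    (h : i * cols + j = r * cols + c) : i = r ∧ j = c := by
  rcases Nat.lt_trichotomy i r with hir | hir | hir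
  · exfalso
    have h1 : i * cols + cols ≤ r * cols := by
      have := Nat.mul_le_mul_right cols (Nat.succ_le_of_lt hir)
      simpa [Nat.succ_mul] using this
    omega
  · exact ⟨hir, by subst hir; omega⟩
  · exfalso
    have h1 : r * cols + cols ≤ i * cols := by
      have := Nat.mul_le_mul_right cols (Nat.succ_le_of_lt hir)
      simpa [Nat.succ_mul] using this
    omega

theorem InvA_bump {m : List (List Int)} {rows cols r c : Nat}
    {st st' : List (List (Option Int)) × List (List (Option (Nat × Nat)))}
    (hr : r < rows) (hc : c < cols)
    (h : InvA m rows cols (r * cols + c) st)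
    (hL1 : st'.1.length = st.1.length) (hL2 : st'.2.length = st.2.length)
    (hRL : ∀ i, (st'.1.getD i []).length = (st.1.getD i []).length ∧
                (st'.2.getD i []).length = (st.2.getD i []).length)
    (hD : ∀ i j, i < rows → j < cols →
      get2 st'.1 i j none = if i = r ∧ j = c then Dspec m r c else get2 st.1 i j none)
    (hP : ∀ i j, i < rows → j < cols →
      get2 st'.2 i j none = if i = r ∧ j = c then Pspec m r c else get2 st.2 i j none) :
    InvA m rows cols (r * cols + c + 1) st' := by
  obtain ⟨h1, h2, h3, h4⟩ := h
  refine ⟨hL1.trans h1, hL2.trans h2,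
    fun i hi => ⟨(hRL i).1.trans (h3 i hi).1, (hRL i).2.trans (h3 i hi).2⟩, ?_⟩
  intro i j hi hj
  rw [hD i j hi hj, hP i j hi hj]
  by_cases hij : i = r ∧ j = c
  · obtain ⟨rfl, rfl⟩ := hij
    rw [if_pos (show i * cols + j < i * cols + j + 1 by omega)]
    exact ⟨by rw [if_pos ⟨rfl, rfl⟩], by rw [if_pos ⟨rfl, rfl⟩]⟩
  · have h4' := h4 i j hi hj
    rw [if_neg hij, if_neg hij]
    by_cases hlt : i * cols + j < r * cols + c
    · rw [if_pos hlt] at h4'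
      rw [if_pos (by omega)]
      exact h4'
    · rw [if_neg hlt] at h4'
      rw [if_neg ?_]
      · exact h4'
      · intro hlt1
        have heq : i * cols + j = r * cols + c := by omega
        exact hij (idx_inj hj hc heq)

theorem stepA_inv {m : List (List Int)} {rows cols r c : Nat}
    {st : List (List (Option Int)) × List (List (Option (Nat × Nat)))}
    (hr : r < rows) (hc : c < cols)
    (h : InvA m rows cols (r * cols + c) st) :
    InvA m rows cols (r * cols + c + 1) (stepA m r st c) := by
  obtain ⟨hL1, hL2, hRL, hV⟩ := h
  have hcur := hV r c hr hc
  rw [if_neg (by omega)] at hcur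
  obtain ⟨hcurD, hcurP⟩ := hcur
  have hup : 0 < r → get2 st.1 (r-1) c none = Dspec m (r-1) c := by
    intro hr0
    have hmul : (r-1+1) * cols = (r-1) * cols + cols := Nat.succ_mul _ _
    have hre : r - 1 + 1 = r := by omega
    rw [hre] at hmul
    have := hV (r-1) c (by omega) hc
    rw [if_pos (by omega)] at this
    exact this.1
  have hleft : 0 < c → get2 st.1 r (c-1) none = Dspec m r (c-1) := by
    intro hc0
    have := hV r (c-1) hr (by omega)
    rw [if_pos (by omega)] at this
    exact this.1
  have hr1 : r < st.1.length := by rw [hL1]; exact hr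
  have hr2 : r < st.2.length := by rw [hL2]; exact hr
  have hc1 : c < (st.1.getD r []).length := by rw [(hRL r hr).1]; exact hc
  have hc2 : c < (st.2.getD r []).length := by rw [(hRL r hr).2]; exact hc
  have hDc := Dspec_eq m r c
  simp only [stepA]
  by_cases hb1 : (decide (0 < r) && oLt (get2 st.1 r c none)
      (oAdd (get2 st.1 (r-1) c none) (get2 m r c 0))) = true
  · rw [if_pos hb1]
    have hr0 : 0 < r := by
      rcases Nat.eq_zero_or_pos r with h0 | h0
      · rw [h0] at hb1; simp at hb1
      · exact h0
    have hU := hup hr0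
    have hb1d : (decide (0 < r) && oLt (if r = 0 ∧ c = 0 then some (get2 m 0 0 0) else none)
        (oAdd (Dspec m (r-1) c) (get2 m r c 0))) = true := by
      rw [← hcurD, ← hU]; exact hb1
    have hcurU : get2 (set2 st.1 r c (oAdd (get2 st.1 (r-1) c none) (get2 m r c 0))) r c none
        = oAdd (Dspec m (r-1) c) (get2 m r c 0) := by
      rw [get2_set2_self _ _ _ _ _ hr1 hc1, hU]
    by_cases hb2 : (decide (0 < c) &&
        oLt (get2 (set2 st.1 r c (oAdd (get2 st.1 (r-1) c none) (get2 m r c 0))) r c none)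
          (oAdd (get2 (set2 st.1 r c (oAdd (get2 st.1 (r-1) c none) (get2 m r c 0))) r (c-1) none)
            (get2 m r c 0))) = true
    · rw [if_pos hb2]
      have hc0 : 0 < c := by
        rcases Nat.eq_zero_or_pos c with h0 | h0
        · rw [h0] at hb2; simp at hb2
        · exact h0
      have hL0 : get2 (set2 st.1 r c (oAdd (get2 st.1 (r-1) c none) (get2 m r c 0))) r (c-1) none
          = Dspec m r (c-1) := by
        rw [get2_set2_ne _ _ _ _ _ _ _ (Or.inr (by omega)), hleft hc0]
      have hcond2 : (decide (0 < c) && oLt (oAdd (Dspec m (r-1) c) (get2 m r c 0))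
          (oAdd (Dspec m r (c-1)) (get2 m r c 0))) = true := by
        rw [← hcurU, ← hL0]; exact hb2
      have hDv : Dspec m r c = oAdd (Dspec m r (c-1)) (get2 m r c 0) := by
        rw [hDc]; simp only [Dcell]
        rw [if_pos hb1d, if_pos hcond2]
      have hPv : Pspec m r c = some (r, c-1) := by
        simp only [Pspec]
        rw [if_pos hb1d, if_pos hcond2]
      refine InvA_bump hr hc ⟨hL1, hL2, hRL, hV⟩ (by simp only [length_set2])
        (by simp only [length_set2]) (fun i => ⟨by simp only [row_length_set2], by simp only [row_length_set2]⟩)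
        ?_ ?_
      · intro i j hi hj
        by_cases hij : i = r ∧ j = c
        · obtain ⟨rfl, rfl⟩ := hij
          rw [if_pos ⟨rfl, rfl⟩]
          rw [get2_set2_self _ _ _ _ _ (by rw [length_set2]; exact hr1)
            (by rw [row_length_set2]; exact hc1), hL0, hDv]
        · have hne : i ≠ r ∨ j ≠ c := by omega
          rw [if_neg hij, get2_set2_ne _ _ _ _ _ _ _ hne, get2_set2_ne _ _ _ _ _ _ _ hne]
      · intro i j hi hj
        by_cases hij : i = r ∧ j = c
        · obtain ⟨rfl, rfl⟩ := hij
          rw [if_pos ⟨rfl, rfl⟩]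
          rw [get2_set2_self _ _ _ _ _ (by rw [length_set2]; exact hr2)
            (by rw [row_length_set2]; exact hc2), hPv]
        · have hne : i ≠ r ∨ j ≠ c := by omega
          rw [if_neg hij, get2_set2_ne _ _ _ _ _ _ _ hne, get2_set2_ne _ _ _ _ _ _ _ hne]
    · rw [if_neg hb2]
      simp only [Bool.not_eq_true] at hb2
      have hcond2 : (decide (0 < c) && oLt (oAdd (Dspec m (r-1) c) (get2 m r c 0))
          (oAdd (Dspec m r (c-1)) (get2 m r c 0))) = false := by
        by_cases hc0 : 0 < c
        · have hL0 : get2 (set2 st.1 r c (oAdd (get2 st.1 (r-1) c none) (get2 m r c 0))) r (c-1) none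
              = Dspec m r (c-1) := by
            rw [get2_set2_ne _ _ _ _ _ _ _ (Or.inr (by omega)), hleft hc0]
          rw [← hcurU, ← hL0]; exact hb2
        · have : c = 0 := by omega
          subst this; simp
      have hDv : Dspec m r c = oAdd (Dspec m (r-1) c) (get2 m r c 0) := by
        rw [hDc]; simp only [Dcell]
        rw [if_pos hb1d, hcond2]
        simp
      have hPv : Pspec m r c = some (r-1, c) := by
        simp only [Pspec]
        rw [if_pos hb1d, hcond2]
        simp [hb1d]
      refine InvA_bump hr hc ⟨hL1, hL2, hRL, hV⟩ (by simp only [length_set2])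
        (by simp only [length_set2]) (fun i => ⟨by simp only [row_length_set2], by simp only [row_length_set2]⟩)
        ?_ ?_
      · intro i j hi hj
        by_cases hij : i = r ∧ j = c
        · obtain ⟨rfl, rfl⟩ := hij
          rw [if_pos ⟨rfl, rfl⟩, get2_set2_self _ _ _ _ _ hr1 hc1, hU, hDv]
        · have hne : i ≠ r ∨ j ≠ c := by omega
          rw [if_neg hij, get2_set2_ne _ _ _ _ _ _ _ hne]
      · intro i j hi hj
        by_cases hij : i = r ∧ j = c
        · obtain ⟨rfl, rfl⟩ := hij
          rw [if_pos ⟨rfl, rfl⟩, get2_set2_self _ _ _ _ _ hr2 hc2, hPv]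
        · have hne : i ≠ r ∨ j ≠ c := by omega
          rw [if_neg hij, get2_set2_ne _ _ _ _ _ _ _ hne]
  · rw [if_neg hb1]
    simp only [Bool.not_eq_true] at hb1
    have hb1d : (decide (0 < r) && oLt (if r = 0 ∧ c = 0 then some (get2 m 0 0 0) else none)
        (oAdd (Dspec m (r-1) c) (get2 m r c 0))) = false := by
      by_cases hr0 : 0 < r
      · rw [← hcurD, ← hup hr0]; exact hb1
      · have : r = 0 := by omega
        subst this; simp
    by_cases hb2 : (decide (0 < c) && oLt (get2 st.1 r c none)
        (oAdd (get2 st.1 r (c-1) none) (get2 m r c 0))) = true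
    · rw [if_pos hb2]
      have hc0 : 0 < c := by
        rcases Nat.eq_zero_or_pos c with h0 | h0
        · rw [h0] at hb2; simp at hb2
        · exact h0
      have hcond2 : (decide (0 < c) && oLt (if r = 0 ∧ c = 0 then some (get2 m 0 0 0) else none)
          (oAdd (Dspec m r (c-1)) (get2 m r c 0))) = true := by
        rw [← hcurD, ← hleft hc0]; exact hb2
      have hDv : Dspec m r c = oAdd (Dspec m r (c-1)) (get2 m r c 0) := by
        rw [hDc]; simp only [Dcell]
        rw [hb1d]
        simp only [Bool.false_eq_true, if_false]
        rw [hcond2]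
        simp
      have hPv : Pspec m r c = some (r, c-1) := by
        simp only [Pspec]
        rw [hb1d]
        simp only [Bool.false_eq_true, if_false]
        rw [hcond2]
        simp
      refine InvA_bump hr hc ⟨hL1, hL2, hRL, hV⟩ (by simp only [length_set2])
        (by simp only [length_set2]) (fun i => ⟨by simp only [row_length_set2], by simp only [row_length_set2]⟩)
        ?_ ?_
      · intro i j hi hj
        by_cases hij : i = r ∧ j = c
        · obtain ⟨rfl, rfl⟩ := hij
          rw [if_pos ⟨rfl, rfl⟩, get2_set2_self _ _ _ _ _ hr1 hc1, hleft hc0, hDv]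
        · have hne : i ≠ r ∨ j ≠ c := by omega
          rw [if_neg hij, get2_set2_ne _ _ _ _ _ _ _ hne]
      · intro i j hi hj
        by_cases hij : i = r ∧ j = c
        · obtain ⟨rfl, rfl⟩ := hij
          rw [if_pos ⟨rfl, rfl⟩, get2_set2_self _ _ _ _ _ hr2 hc2, hPv]
        · have hne : i ≠ r ∨ j ≠ c := by omega
          rw [if_neg hij, get2_set2_ne _ _ _ _ _ _ _ hne]
    · rw [if_neg hb2]
      simp only [Bool.not_eq_true] at hb2
      have hcond2 : (decide (0 < c) && oLt (if r = 0 ∧ c = 0 then some (get2 m 0 0 0) else none)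
          (oAdd (Dspec m r (c-1)) (get2 m r c 0))) = false := by
        by_cases hc0 : 0 < c
        · rw [← hcurD, ← hleft hc0]; exact hb2
        · have : c = 0 := by omega
          subst this; simp
      have hDv : Dspec m r c = (if r = 0 ∧ c = 0 then some (get2 m 0 0 0) else none) := by
        rw [hDc]; simp only [Dcell]
        rw [hb1d]
        simp only [Bool.false_eq_true, if_false]
        rw [hcond2]
        simp
      have hPv : Pspec m r c = none := by
        simp only [Pspec]
        rw [hb1d]
        simp only [Bool.false_eq_true, if_false]
        rw [hcond2]
        simp
      refine InvA_bump hr hc ⟨hL1, hL2, hRL, hV⟩ rfl rfl (fun i => ⟨rfl, rfl⟩) ?_ ?_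
      · intro i j hi hj
        by_cases hij : i = r ∧ j = c
        · obtain ⟨rfl, rfl⟩ := hij
          rw [if_pos ⟨rfl, rfl⟩, hcurD, hDv]
        · rw [if_neg hij]
      · intro i j hi hj
        by_cases hij : i = r ∧ j = c
        · obtain ⟨rfl, rfl⟩ := hij
          rw [if_pos ⟨rfl, rfl⟩, hcurP, hPv]
        · rw [if_neg hij]

theorem inner_inv {m : List (List Int)} {rows cols r : Nat}
    {st : List (List (Option Int)) × List (List (Option (Nat × Nat)))}
    (hr : r < rows) :
    ∀ n, n ≤ cols → InvA m rows cols (r * cols) st →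
      InvA m rows cols (r * cols + n) ((List.range n).foldl (stepA m r) st) := by
  intro n
  induction n with
  | zero => intro _ h; simpa using h
  | succ k ih =>
    intro hk h
    rw [List.range_succ, List.foldl_append, List.foldl_cons, List.foldl_nil]
    exact stepA_inv hr (by omega) (ih (by omega) h)

theorem outer_inv {m : List (List Int)} {rows cols : Nat}
    {st0 : List (List (Option Int)) × List (List (Option (Nat × Nat)))} :
    ∀ n, n ≤ rows → InvA m rows cols 0 st0 →
      InvA m rows cols (n * cols)
        ((List.range n).foldl (fun st r => (List.range cols).foldl (stepA m r) st) st0) := by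
  intro n
  induction n with
  | zero => intro _ h; simpa using h
  | succ k ih =>
    intro hk h
    rw [List.range_succ, List.foldl_append, List.foldl_cons, List.foldl_nil]
    have := inner_inv (m := m) (st := (List.range k).foldl
        (fun st r => (List.range cols).foldl (stepA m r) st) st0)
        (by omega : k < rows) cols (le_refl cols) (ih (by omega) h)
    simpa [Nat.succ_mul] using this

theorem init_inv {m : List (List Int)} {rows cols : Nat}
    (hrows : 0 < rows) (hcols : 0 < cols) :
    InvA m rows cols 0
      (set2 (List.replicate rows (List.replicate cols (none : Option Int))) 0 0
          (some (get2 m 0 0 0)),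
       List.replicate rows (List.replicate cols (none : Option (Nat × Nat)))) := by
  refine ⟨by simp [length_set2], by simp, ?_, ?_⟩
  · intro i hi
    constructor
    · rw [row_length_set2]
      simp [List.getD_eq_getElem?_getD, List.getElem?_replicate, hi]
    · simp [List.getD_eq_getElem?_getD, List.getElem?_replicate, hi]
  · intro i j hi hj
    simp only [Nat.not_lt_zero, if_neg (by omega : ¬ i * cols + j < 0)]
    constructor
    · by_cases h00 : i = 0 ∧ j = 0
      · obtain ⟨rfl, rfl⟩ := h00
        rw [get2_set2_self]
        · simp
        · simpa using hrows
        · simp [List.getD_eq_getElem?_getD, List.getElem?_replicate, hrows, hcols]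
      · rw [get2_set2_ne _ _ _ _ _ _ _ (by omega), get2_replicate]
        simp [h00]
    · simp [get2_replicate, hi, hj]

-- ---- the integer dp recurrence that B computes ----

def Ds (m : List (List Int)) : Nat → Nat → Int
  | 0, 0 => get2 m 0 0 0
  | 0, c+1 => Ds m 0 c + get2 m 0 (c+1) 0
  | r+1, 0 => Ds m r 0 + get2 m (r+1) 0 0
  | r+1, c+1 => max (Ds m r (c+1)) (Ds m (r+1) c) + get2 m (r+1) (c+1) 0

theorem Dspec_eq_some (m : List (List Int)) : ∀ r c, Dspec m r c = some (Ds m r c) := by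
  intro r
  induction r with
  | zero =>
    intro c
    induction c with
    | zero => simp [Dspec, Dcell, Ds, oLt]
    | succ j ih => rw [Dtop, ih]; simp [oAdd, Ds]
  | succ i ihr =>
    intro c
    induction c with
    | zero => rw [Dleft, ihr 0]; simp [oAdd, Ds]
    | succ j ih =>
      rw [Dmid, ihr (j+1), ih]
      simp only [oAdd, Option.map_some, oLt, Ds]
      split_ifs with h
      · simp at h ⊢; omega
      · simp at h ⊢; omega

-- ---- B's dp fold computes Ds ----

theorem rowB_spec (m : List (List Int)) (r cols : Nat) (prev : List Int)
    (hprev : 0 < r → ∀ c, c < cols → prev.getD c 0 = Ds m (r-1) c) :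
    ∀ n, n ≤ cols →
      ((List.range n).foldl (fun row c =>
        let v := (m.getD r []).getD c 0
        row ++ [if r = 0 ∧ c = 0 then v
                else if r = 0 then row.getD (c-1) 0 + v
                else if c = 0 then prev.getD 0 0 + v
                else max (prev.getD c 0) (row.getD (c-1) 0) + v]) []).length = n ∧
      ∀ c, c < n →
        (((List.range n).foldl (fun row c =>
          let v := (m.getD r []).getD c 0
          row ++ [if r = 0 ∧ c = 0 then v
                  else if r = 0 then row.getD (c-1) 0 + v
                  else if c = 0 then prev.getD 0 0 + v
                  else max (prev.getD c 0) (row.getD (c-1) 0) + v]) []).getD c 0) = Ds m r c := by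
  intro n
  induction n with
  | zero => exact fun _ => ⟨rfl, fun c hc => absurd hc (by omega)⟩
  | succ k ih =>
    intro hk
    obtain ⟨ihl, ihv⟩ := ih (by omega)
    rw [List.range_succ, List.foldl_append, List.foldl_cons, List.foldl_nil]
    set row := (List.range k).foldl (fun row c =>
        let v := (m.getD r []).getD c 0
        row ++ [if r = 0 ∧ c = 0 then v
                else if r = 0 then row.getD (c-1) 0 + v
                else if c = 0 then prev.getD 0 0 + v
                else max (prev.getD c 0) (row.getD (c-1) 0) + v]) [] with hrow
    refine ⟨by simp [ihl], ?_⟩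
    intro c hc
    by_cases hck : c < k
    · rw [List.getD_eq_getElem?_getD, List.getElem?_append_left (show c < row.length by omega),
        ← List.getD_eq_getElem?_getD]
      exact ihv c hck
    · have hck' : c = k := by omega
      subst hck'
      have hget : (row ++ [if r = 0 ∧ c = 0 then (m.getD r []).getD c 0
          else if r = 0 then row.getD (c-1) 0 + (m.getD r []).getD c 0
          else if c = 0 then prev.getD 0 0 + (m.getD r []).getD c 0
          else max (prev.getD c 0) (row.getD (c-1) 0) + (m.getD r []).getD c 0]).getD c 0
          = (if r = 0 ∧ c = 0 then (m.getD r []).getD c 0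
          else if r = 0 then row.getD (c-1) 0 + (m.getD r []).getD c 0
          else if c = 0 then prev.getD 0 0 + (m.getD r []).getD c 0
          else max (prev.getD c 0) (row.getD (c-1) 0) + (m.getD r []).getD c 0) := by
        rw [List.getD_eq_getElem?_getD, List.getElem?_append_right (by omega), ihl]
        simp
      rw [hget]
      have hmv : (m.getD r []).getD c 0 = get2 m r c 0 := rfl
      rcases r with _ | i <;> rcases c with _ | j
      · simp [Ds, get2, hmv]
      · have : ¬ ((0:Nat) = 0 ∧ j + 1 = 0) := by omega
        rw [if_neg this, if_pos rfl, hmv, Nat.add_sub_cancel, ihv j (by omega)]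
        simp [Ds]
      · have h1 : ¬ ((i+1:Nat) = 0 ∧ (0:Nat) = 0) := by omega
        rw [if_neg h1, if_neg (by omega), if_pos rfl, hmv, hprev (by omega) 0 (by omega)]
        simp [Ds]
      · have h1 : ¬ ((i+1:Nat) = 0 ∧ (j+1:Nat) = 0) := by omega
        rw [if_neg h1, if_neg (by omega), if_neg (by omega), hmv, Nat.add_sub_cancel,
          hprev (by omega) (j+1) (by omega), ihv j (by omega)]
        simp [Ds]

theorem dpB_spec (m : List (List Int)) (rows cols : Nat) (hcols : 0 < cols) :
    ∀ k, k ≤ rows →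
      (((List.range k).foldl (fun st r =>
        let row := rowB (m.getD r []) r st.2 cols
        (st.1 ++ [row], row)) (([] : List (List Int)), ([] : List Int))).1.length = k) ∧
      (∀ i j, i < k → j < cols →
        ((((List.range k).foldl (fun st r =>
          let row := rowB (m.getD r []) r st.2 cols
          (st.1 ++ [row], row)) (([] : List (List Int)), ([] : List Int))).1.getD i []).getD j 0
          = Ds m i j)) ∧
      (0 < k → ∀ j, j < cols →
        (((List.range k).foldl (fun st r =>
          let row := rowB (m.getD r []) r st.2 cols
          (st.1 ++ [row], row)) (([] : List (List Int)), ([] : List Int))).2.getD j 0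
          = Ds m (k-1) j)) := by
  intro k
  induction k with
  | zero => exact fun _ => ⟨rfl, fun i j hi => absurd hi (by omega), fun h => absurd h (by omega)⟩
  | succ t ih =>
    intro hk
    obtain ⟨ihl, ihv, ihp⟩ := ih (by omega)
    rw [List.range_succ, List.foldl_append, List.foldl_cons, List.foldl_nil]
    set st := (List.range t).foldl (fun st r =>
        let row := rowB (m.getD r []) r st.2 cols
        (st.1 ++ [row], row)) (([] : List (List Int)), ([] : List Int)) with hst
    have hrow := rowB_spec m t cols st.2 (fun ht0 => ihp ht0) cols (le_refl cols)
    refine ⟨by simp [ihl], ?_, ?_⟩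
    · intro i j hi hj
      by_cases hit : i < t
      · have hro : (st.1 ++ [rowB (m.getD t []) t st.2 cols]).getD i [] = st.1.getD i [] := by
          rw [List.getD_eq_getElem?_getD, List.getElem?_append_left (show i < st.1.length by omega),
            ← List.getD_eq_getElem?_getD]
        simp only []
        rw [hro]
        exact ihv i j hit hj
      · have : i = t := by omega
        subst this
        have hro : (st.1 ++ [rowB (m.getD i []) i st.2 cols]).getD i []
            = rowB (m.getD i []) i st.2 cols := by
          rw [List.getD_eq_getElem?_getD, List.getElem?_append_right (by omega), ihl]
          simp
        simp only []
        rw [hro]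
        exact hrow.2 j hj
    · intro _ j hj
      simp only [Nat.add_sub_cancel]
      exact hrow.2 j hj

-- ---- the abstract parent chain and both reconstructions ----

theorem Pspec_parent (m : List (List Int)) (r c : Nat) (p : Nat × Nat)
    (h : Pspec m r c = some p) : p.1 ≤ r ∧ p.2 ≤ c ∧ p.1 + p.2 < r + c := by
  rcases r with _ | i <;> rcases c with _ | j
  · rw [P00] at h; cases h
  · rw [Ptop] at h; cases h; simp
  · rw [Pleft] at h; cases h; simp
  · rw [Pmid] at h
    split at h <;> cases h <;> simp <;> omega

def Cspec (m : List (List Int)) : Nat → Nat → Nat → List (Nat × Nat)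
  | fuel, r, c =>
    match Pspec m r c with
    | none => [(r, c)]
    | some p =>
      match fuel with
      | 0 => [(r, c)]
      | f + 1 => (r, c) :: Cspec m f p.1 p.2

theorem Cspec_bounds (m : List (List Int)) :
    ∀ fuel r c rc, rc ∈ Cspec m fuel r c → rc.1 ≤ r ∧ rc.2 ≤ c := by
  intro fuel
  induction fuel with
  | zero =>
    intro r c rc h
    rw [Cspec] at h
    rcases hp : Pspec m r c with _ | p <;> rw [hp] at h <;>
      simp at h <;> simp [h]
  | succ f ih =>
    intro r c rc h
    rw [Cspec] at h
    rcases hp : Pspec m r c with _ | p <;> rw [hp] at h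
    · simp at h; simp [h]
    · rcases List.mem_cons.mp h with h | h
      · simp [h]
      · obtain ⟨h1, h2, -⟩ := Pspec_parent m r c p hp
        obtain ⟨g1, g2⟩ := ih p.1 p.2 rc h
        exact ⟨le_trans g1 h1, le_trans g2 h2⟩

theorem walkA_chain (m : List (List Int)) (par : List (List (Option (Nat × Nat))))
    (rows cols : Nat)
    (hP : ∀ i j, i < rows → j < cols → get2 par i j none = Pspec m i j) :
    ∀ fuel r c path, r < rows → c < cols →
      walkA par fuel r c path =
        (Cspec m fuel r c).foldl (fun p rc => set2 p rc.1 rc.2 1) path := by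
  intro fuel
  induction fuel with
  | zero =>
    intro r c path hr hc
    rw [walkA, Cspec, hP r c hr hc]
    rcases hp : Pspec m r c with _ | p <;> simp
  | succ f ih =>
    intro r c path hr hc
    rw [walkA, Cspec, hP r c hr hc]
    rcases hp : Pspec m r c with _ | ⟨r', c'⟩
    · simp
    · simp only [List.foldl_cons]
      obtain ⟨h1, h2, -⟩ := Pspec_parent m r c (r', c') hp
      exact ih r' c' _ (by omega) (by omega)

theorem cellsB_chain (m dp : List (List Int)) (rows cols : Nat)
    (hD : ∀ i j, i < rows → j < cols → (dp.getD i []).getD j 0 = Ds m i j) :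
    ∀ fuel r c acc, r < rows → c < cols →
      cellsB dp m fuel r c acc = acc ++ Cspec m fuel r c := by
  intro fuel
  induction fuel with
  | zero =>
    intro r c acc hr hc
    rw [cellsB, Cspec]
    rcases hp : Pspec m r c with _ | p <;> split_ifs <;> rfl
  | succ f ih =>
    intro r c acc hr hc
    rw [cellsB, Cspec]
    have hm : ∀ i j, (m.getD i []).getD j 0 = get2 m i j 0 := fun _ _ => rfl
    rcases r with _ | i <;> rcases c with _ | j
    · rw [P00]
      simp
    · rw [Ptop]
      simp only [Nat.add_sub_cancel]
      have hleft : ((dp.getD 0 []).getD (j+1) 0 ==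
          (dp.getD 0 []).getD j 0 + (m.getD 0 []).getD (j+1) 0) = true := by
        rw [hD 0 (j+1) hr hc, hD 0 j hr (by omega), hm]
        simp [Ds]
      simp only [Nat.lt_irrefl, decide_false, Bool.false_and, Bool.false_eq_true, if_false,
        Nat.zero_lt_succ, decide_true, Bool.true_and, hleft, if_true]
      rw [ih 0 j _ hr (by omega)]
      simp
    · rw [Pleft]
      simp only [Nat.add_sub_cancel]
      have hup : ((dp.getD (i+1) []).getD 0 0 ==
          (dp.getD i []).getD 0 0 + (m.getD (i+1) []).getD 0 0) = true := by
        rw [hD (i+1) 0 hr hc, hD i 0 (by omega) hc, hm]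
        simp [Ds]
      simp only [Nat.zero_lt_succ, decide_true, Bool.true_and, hup, if_true]
      rw [ih i 0 _ (by omega) hc]
      simp
    · rw [Pmid, Dspec_eq_some, Dspec_eq_some]
      simp only [oAdd, Option.map_some, oLt, Nat.add_sub_cancel]
      have hdp : (dp.getD (i+1) []).getD (j+1) 0
          = max (Ds m i (j+1)) (Ds m (i+1) j) + get2 m (i+1) (j+1) 0 := by
        rw [hD (i+1) (j+1) hr hc]
        simp [Ds]
      have hdpu : (dp.getD i []).getD (j+1) 0 = Ds m i (j+1) := hD i (j+1) (by omega) hc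
      have hdpl : (dp.getD (i+1) []).getD j 0 = Ds m (i+1) j := hD (i+1) j hr (by omega)
      have hmg : (m.getD (i+1) []).getD (j+1) 0 = get2 m (i+1) (j+1) 0 := rfl
      by_cases hUL : Ds m i (j+1) < Ds m (i+1) j
      · have hupf : ((dp.getD (i+1) []).getD (j+1) 0 ==
            (dp.getD i []).getD (j+1) 0 + (m.getD (i+1) []).getD (j+1) 0) = false := by
          rw [hdp, hdpu, hmg, beq_eq_false_iff_ne]
          omega
        have hleft : ((dp.getD (i+1) []).getD (j+1) 0 ==
            (dp.getD (i+1) []).getD j 0 + (m.getD (i+1) []).getD (j+1) 0) = true := by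
          rw [hdp, hdpl, hmg, beq_iff_eq]
          omega
        have hcond : (decide (Ds m i (j+1) + get2 m (i+1) (j+1) 0 <
            Ds m (i+1) j + get2 m (i+1) (j+1) 0)) = true := by
          simp only [decide_eq_true_eq]
          omega
        simp only [Nat.zero_lt_succ, decide_true, Bool.true_and, hupf, Bool.false_eq_true,
          if_false, hleft, if_true, hcond]
        rw [ih (i+1) j _ hr (by omega)]
        simp
      · have hupt : ((dp.getD (i+1) []).getD (j+1) 0 ==
            (dp.getD i []).getD (j+1) 0 + (m.getD (i+1) []).getD (j+1) 0) = true := by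
          rw [hdp, hdpu, hmg, beq_iff_eq]
          omega
        have hcond : (decide (Ds m i (j+1) + get2 m (i+1) (j+1) 0 <
            Ds m (i+1) j + get2 m (i+1) (j+1) 0)) = false := by
          simp only [decide_eq_false_iff_not]
          omega
        simp only [Nat.zero_lt_succ, decide_true, Bool.true_and, hupt, if_true, hcond,
          Bool.false_eq_true, if_false]
        rw [ih i (j+1) _ (by omega) hc]
        simp

-- ---- marking a list of cells vs membership ----

theorem mark_length (L : List (Nat × Nat)) :
    ∀ P : List (List Int), (L.foldl (fun p rc => set2 p rc.1 rc.2 1) P).length = P.length := by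
  induction L with
  | nil => intro P; rfl
  | cons x L ih => intro P; rw [List.foldl_cons, ih, length_set2]

theorem mark_row_length (L : List (Nat × Nat)) :
    ∀ (P : List (List Int)) (i : Nat),
      ((L.foldl (fun p rc => set2 p rc.1 rc.2 1) P).getD i []).length = (P.getD i []).length := by
  induction L with
  | nil => intro P i; rfl
  | cons x L ih => intro P i; rw [List.foldl_cons, ih, row_length_set2]

theorem get2_mark (L : List (Nat × Nat)) :
    ∀ (P : List (List Int)) (i j : Nat),
      (∀ rc ∈ L, rc.1 < P.length ∧ rc.2 < (P.getD rc.1 []).length) →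
      get2 (L.foldl (fun p rc => set2 p rc.1 rc.2 1) P) i j 0 =
        if (i, j) ∈ L then 1 else get2 P i j 0 := by
  induction L with
  | nil => intro P i j _; simp
  | cons x L ih =>
    intro P i j hb
    rw [List.foldl_cons]
    have hbx := hb x (List.mem_cons_self)
    have hb' : ∀ rc ∈ L, rc.1 < (set2 P x.1 x.2 1).length ∧
        rc.2 < ((set2 P x.1 x.2 1).getD rc.1 []).length := by
      intro rc hrc
      rw [length_set2, row_length_set2]
      exact hb rc (List.mem_cons_of_mem _ hrc)
    rw [ih _ i j hb']
    by_cases hmem : (i, j) ∈ L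
    · rw [if_pos hmem, if_pos (List.mem_cons_of_mem _ hmem)]
    · rw [if_neg hmem]
      by_cases hx : i = x.1 ∧ j = x.2
      · obtain ⟨rfl, rfl⟩ := hx
        rw [get2_set2_self _ _ _ _ _ hbx.1 hbx.2, if_pos (by simp)]
      · rw [get2_set2_ne _ _ _ _ _ _ _ (by omega)]
        rw [if_neg ?_]
        intro hc
        rcases List.mem_cons.mp hc with hc | hc
        · exact hx ⟨congrArg Prod.fst hc, congrArg Prod.snd hc⟩
        · exact hmem hc

-- ---- assembly ----

theorem getD_eq_get' {α : Type} (l : List α) (n : Nat) (d : α) (h : n < l.length) :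
    l.getD n d = l[n] := by
  rw [List.getD_eq_getElem?_getD, List.getElem?_eq_getElem h]
  rfl

theorem idx_lt {rows cols i j : Nat} (hi : i < rows) (hj : j < cols) :
    i * cols + j < rows * cols := by
  have h1 : (i+1) * cols ≤ rows * cols := Nat.mul_le_mul_right cols (Nat.succ_le_of_lt hi)
  have h2 : (i+1) * cols = i * cols + cols := Nat.succ_mul _ _
  omega

theorem main_eq (matrix : List (List Int))
    (hrows : 0 < matrix.length) (hcols : 0 < (matrix.headD []).length) :
    dp_longest_path matrix = dp_longest_path_alt matrix := by
  simp only [dp_longest_path, dp_longest_path_alt]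
  set rows := matrix.length with hR
  set cols := (matrix.headD []).length with hC
  set stA := (List.range rows).foldl
      (fun st r => (List.range cols).foldl (stepA matrix r) st)
      (set2 (List.replicate rows (List.replicate cols (none : Option Int))) 0 0
          (some (get2 matrix 0 0 0)),
        List.replicate rows (List.replicate cols (none : Option (Nat × Nat)))) with hstA
  have hfin := outer_inv (m := matrix) (rows := rows) (cols := cols)
      rows (le_refl _) (init_inv hrows hcols)
  rw [← hstA] at hfin
  obtain ⟨-, -, -, hcell⟩ := hfin
  have hDchar : ∀ i j, i < rows → j < cols → get2 stA.1 i j none = Dspec matrix i j := by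
    intro i j hi hj
    have := hcell i j hi hj
    rw [if_pos (idx_lt hi hj)] at this
    exact this.1
  have hPchar : ∀ i j, i < rows → j < cols → get2 stA.2 i j none = Pspec matrix i j := by
    intro i j hi hj
    have := hcell i j hi hj
    rw [if_pos (idx_lt hi hj)] at this
    exact this.2
  obtain ⟨-, hBval, -⟩ := dpB_spec matrix rows cols hcols rows (le_refl _)
  have hBv : ∀ i j, i < rows → j < cols →
      ((dpB matrix rows cols).getD i []).getD j 0 = Ds matrix i j := by
    intro i j hi hj
    exact hBval i j hi hj
  have hr1 : rows - 1 < rows := by omega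
  have hc1 : cols - 1 < cols := by omega
  refine Prod.ext ?_ ?_
  · simp only []
    rw [hDchar _ _ hr1 hc1, Dspec_eq_some, hBv _ _ hr1 hc1]
    rfl
  · simp only []
    rw [walkA_chain matrix stA.2 rows cols hPchar (rows + cols) (rows - 1) (cols - 1) _ hr1 hc1,
      cellsB_chain matrix (dpB matrix rows cols) rows cols hBv (rows + cols)
        (rows - 1) (cols - 1) [] hr1 hc1]
    set C := Cspec matrix (rows + cols) (rows - 1) (cols - 1) with hCdef
    have hCb : ∀ rc ∈ C, rc.1 < rows ∧ rc.2 < cols := by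
      intro rc hrc
      obtain ⟨h1, h2⟩ := Cspec_bounds matrix (rows + cols) (rows - 1) (cols - 1) rc hrc
      omega
    simp only [List.nil_append]
    set Z := List.replicate rows (List.replicate cols (0 : Int)) with hZ
    have hZb : ∀ rc ∈ C, rc.1 < Z.length ∧ rc.2 < (Z.getD rc.1 []).length := by
      intro rc hrc
      obtain ⟨h1, h2⟩ := hCb rc hrc
      constructor
      · simpa [hZ] using h1
      · rw [hZ]
        simp [List.getD_eq_getElem?_getD, List.getElem?_replicate, h1]
        omega
    apply List.ext_getElem
    · rw [mark_length, hZ]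
      simp
    · intro i hi1 hi2
      have hi : i < rows := by
        rw [mark_length, hZ] at hi1
        simpa using hi1
      apply List.ext_getElem
      · rw [← getD_eq_get' (C.foldl (fun p rc => set2 p rc.1 rc.2 1) Z) i [] hi1,
          mark_row_length, hZ]
        simp [List.getD_eq_getElem?_getD, List.getElem?_replicate, hi,
          List.getElem_map, List.getElem_range]
      · intro j hj1 hj2
        have hj : j < cols := by
          simp at hj2
          omega
        have hL : (C.foldl (fun p rc => set2 p rc.1 rc.2 1) Z)[i][j] =
            get2 (C.foldl (fun p rc => set2 p rc.1 rc.2 1) Z) i j 0 := by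
          unfold get2
          rw [getD_eq_get' _ _ _ hi1, getD_eq_get' _ _ _ hj1]
        rw [hL, get2_mark C Z i j hZb]
        have hcm : PySem.Set.contains (PySem.Set.ofList C) (i, j) = decide ((i, j) ∈ C) := by
          by_cases hmem : (i, j) ∈ C
          · simp only [hmem, decide_true]
            exact (PySem.Set.contains_iff _ _).mpr (by simpa [PySem.Set.mem_ofList] using hmem)
          · have hnm : (i, j) ∉ PySem.Set.ofList C := by
              simpa [PySem.Set.mem_ofList] using hmem
            simp only [hmem, decide_false]
            rw [← Bool.not_eq_true]
            intro hcon
            exact hnm ((PySem.Set.contains_iff _ _).mp hcon)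
        simp only [List.getElem_map, List.getElem_range, hcm]
        by_cases hmem : (i, j) ∈ C
        · simp [hmem]
        · simp [hmem, hZ, get2_replicate, hi, hj]

-- ===== VERDICT (by name: the statement is the Claim_ definition above) =====
theorem dp_longest_path_spec : Claim_equal_dp_longest_path := by
  intro matrix _ hpre
  obtain ⟨hne, hrow, -⟩ := hpre
  exact main_eq matrix (by simpa [List.length_pos_iff] using hne)
    (by simpa [List.length_pos_iff] using hrow)
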